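-- pv_equiv track=rewrite | github.com/edwin0617/portfolio | GRU_loss_add/dataset.py | add_murmur_seg
-- ===== SOURCE A (Python) =====
-- def add_murmur_seg(segmentation_label, timing):
--
--     added_label = []
--
--     if timing == 'Early-systolic':
--         for state in segmentation_label:
--             if state == 1: # if state is systole
--                 added_label.append(4) # add murmur state before systole
--                 added_label.append(state)
--                 continue
--             added_label.append(state) # add systole after murmur
--
--     elif timing == 'Mid-systolic':
--         for state in segmentation_label:
--             if state == 1:
--                 added_label.append(state) # add First systole
--                 added_label.append(4) # add murmur state after First systole
--                 added_label.append(state)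
--                 continue
--             added_label.append(state) # add Second systole after murmur
--
--     elif timing == 'Late-systolic':
--         for state in segmentation_label:
--             if state == 1:
--                 added_label.append(state)
--                 added_label.append(4)
--                 continue
--             added_label.append(state)
--
--     elif timing == 'Holosystolic':
--         for state in segmentation_label:
--             if state == 1:
--                 added_label.append(4)
--                 continue
--             added_label.append(state)
--
--     # elif timing ==
--
--     else:
--         # raise Exception(f"\nThere are another kind of systolic!\n It is {timing}")
--         added_label = segmentation_label
--
--
--     return added_label
-- ===== SOURCE B (Python) =====
-- def add_murmur_seg(segmentation_label, timing):
--     # Each valid timing places the murmur state 4 at the systole, optionally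
--     # keeping a systole marker before and/or after it.
--     if timing not in ('Early-systolic', 'Mid-systolic', 'Late-systolic', 'Holosystolic'):
--         return segmentation_label
--     lead = timing in ('Mid-systolic', 'Late-systolic')
--     trail = timing in ('Early-systolic', 'Mid-systolic')
--     # Build the result back-to-front, pushing onto a stack, then reverse once.
--     out = []
--     for state in reversed(segmentation_label):
--         if state != 1:
--             out.append(state)
--         else:
--             if trail:
--                 out.append(1)
--             out.append(4)
--             if lead:
--                 out.append(1)
--     out.reverse()
--     return out
-- ===== Notes on version B (the rewrite author's own statement) =====
-- stated objective: alternative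
-- what changed: Replaces A's four duplicated forward expansion loops by one reversed-traversal stack build: the timing is reduced to two booleans (systole kept before/after the murmur), the list is scanned back-to-front pushing single elements, and the stack is reversed once at the end.
import Mathlib
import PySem

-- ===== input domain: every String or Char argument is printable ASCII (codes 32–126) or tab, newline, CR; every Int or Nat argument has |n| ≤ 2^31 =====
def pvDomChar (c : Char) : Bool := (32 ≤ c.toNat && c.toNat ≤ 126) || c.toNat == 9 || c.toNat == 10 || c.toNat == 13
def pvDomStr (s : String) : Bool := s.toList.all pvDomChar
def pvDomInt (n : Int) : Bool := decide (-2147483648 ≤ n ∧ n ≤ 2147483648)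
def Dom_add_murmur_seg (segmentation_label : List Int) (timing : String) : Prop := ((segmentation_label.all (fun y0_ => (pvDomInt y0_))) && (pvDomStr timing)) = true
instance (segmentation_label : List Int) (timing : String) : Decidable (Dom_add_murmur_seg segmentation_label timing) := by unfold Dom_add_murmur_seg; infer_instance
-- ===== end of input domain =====

-- B replaces A's four duplicated forward loops by a reversed-traversal stack build driven by two
-- booleans (objective: alternative). Return value only; A's else branch aliases the input list.

-- ===== PORT A =====
def add_murmur_seg (segmentation_label : List Int) (timing : String) : List Int :=
  if timing == "Early-systolic" then
    segmentation_label.foldl (fun added_label state =>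
      if state == 1 then added_label ++ [4, state] else added_label ++ [state]) []
  else if timing == "Mid-systolic" then
    segmentation_label.foldl (fun added_label state =>
      if state == 1 then added_label ++ [state, 4, state] else added_label ++ [state]) []
  else if timing == "Late-systolic" then
    segmentation_label.foldl (fun added_label state =>
      if state == 1 then added_label ++ [state, 4] else added_label ++ [state]) []
  else if timing == "Holosystolic" then
    segmentation_label.foldl (fun added_label state =>
      if state == 1 then added_label ++ [4] else added_label ++ [state]) []
  else
    segmentation_label

-- ===== PORT B =====
def add_murmur_seg_alt (segmentation_label : List Int) (timing : String) : List Int :=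
  if (["Early-systolic", "Mid-systolic", "Late-systolic", "Holosystolic"] : List String).contains timing then
    let lead := (["Mid-systolic", "Late-systolic"] : List String).contains timing
    let trail := (["Early-systolic", "Mid-systolic"] : List String).contains timing
    (segmentation_label.reverse.foldl (fun out state =>
      if state != 1 then out ++ [state]
      else ((if trail then out ++ [1] else out) ++ [4]) ++ (if lead then [1] else [])) []).reverse
  else
    segmentation_label

-- ===== PRECONDITION & SPEC =====
def Spec_add_murmur_seg (segmentation_label : List Int) (timing : String) (out : List Int) : Prop := out = add_murmur_seg_alt segmentation_label timing
instance (segmentation_label : List Int) (timing : String) (out : List Int) : Decidable (Spec_add_murmur_seg segmentation_label timing out) := by unfold Spec_add_murmur_seg; infer_instance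

-- ===== CLAIM (what is proved, stated in full; the proofs are below) =====
def Claim_equal_add_murmur_seg : Prop := ∀ (segmentation_label : List Int) (timing : String), Dom_add_murmur_seg segmentation_label timing → Spec_add_murmur_seg segmentation_label timing (add_murmur_seg segmentation_label timing)

-- ===== LEMMAS AND PROOFS =====

-- A's per-branch loop appends a fixed piece per element: it is a flatMap.
theorem branch_eq_acc (l : List Int) (p : List Int) (f : Int → List Int) (hf : f 1 = p)
    (acc : List Int) :
    l.foldl (fun a s => if s == 1 then a ++ f s else a ++ [s]) acc
      = acc ++ l.flatMap (fun s => if s = 1 then p else [s]) := by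
  induction l generalizing acc with
  | nil => simp
  | cons x xs ih =>
    rw [List.foldl_cons, List.flatMap_cons]
    by_cases hx : x = 1
    · subst hx; rw [if_pos (by decide), ih]; simp [hf, List.append_assoc]
    · rw [if_neg (by simpa using hx), ih]; simp [hx, List.append_assoc]

-- B's reversed stack build also appends a fixed piece per element of the reversed list.
theorem alt_fold_eq (lead trail : Bool) (l acc : List Int) :
    l.foldl (fun out s =>
      if s != 1 then out ++ [s]
      else ((if trail then out ++ [1] else out) ++ [4]) ++ (if lead then [1] else [])) acc
      = acc ++ l.flatMap (fun s =>
          if s = 1 then (if trail then [1] else []) ++ [4] ++ (if lead then [1] else []) else [s]) := by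
  induction l generalizing acc with
  | nil => simp
  | cons x xs ih =>
    rw [List.foldl_cons, List.flatMap_cons]
    by_cases hx : x = 1
    · subst hx
      rw [if_neg (show ¬((1:Int) != 1) = true by simp), ih]
      cases trail <;> cases lead <;> simp [List.append_assoc]
    · rw [if_pos (show ((x != 1) = true) by simpa using hx), ih]; simp [hx, List.append_assoc]

theorem alt_branch (lead trail : Bool) (l : List Int) :
    (l.reverse.foldl (fun out s =>
      if s != 1 then out ++ [s]
      else ((if trail then out ++ [1] else out) ++ [4]) ++ (if lead then [1] else [])) []).reverse
      = l.flatMap (fun s =>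
          if s = 1 then (if lead then [1] else []) ++ [4] ++ (if trail then [1] else []) else [s]) := by
  rw [alt_fold_eq, List.nil_append, List.reverse_flatMap, List.reverse_reverse]
  apply List.flatMap_congr
  intro s _
  by_cases hs : s = 1
  · subst hs; cases lead <;> cases trail <;> simp
  · simp [hs]

theorem alt_at_early (l : List Int) :
    add_murmur_seg_alt l "Early-systolic" = l.flatMap (fun s => if s = 1 then [4, 1] else [s]) := by
  unfold add_murmur_seg_alt
  rw [if_pos (by decide)]
  rw [alt_branch ((["Mid-systolic", "Late-systolic"] : List String).contains "Early-systolic")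
      ((["Early-systolic", "Mid-systolic"] : List String).contains "Early-systolic") l]
  apply List.flatMap_congr
  intro s _
  by_cases hs : s = 1
  · subst hs; simp
  · simp [hs]

theorem alt_at_mid (l : List Int) :
    add_murmur_seg_alt l "Mid-systolic" = l.flatMap (fun s => if s = 1 then [1, 4, 1] else [s]) := by
  unfold add_murmur_seg_alt
  rw [if_pos (by decide)]
  rw [alt_branch ((["Mid-systolic", "Late-systolic"] : List String).contains "Mid-systolic")
      ((["Early-systolic", "Mid-systolic"] : List String).contains "Mid-systolic") l]
  apply List.flatMap_congr
  intro s _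
  by_cases hs : s = 1
  · subst hs; simp
  · simp [hs]

theorem alt_at_late (l : List Int) :
    add_murmur_seg_alt l "Late-systolic" = l.flatMap (fun s => if s = 1 then [1, 4] else [s]) := by
  unfold add_murmur_seg_alt
  rw [if_pos (by decide)]
  rw [alt_branch ((["Mid-systolic", "Late-systolic"] : List String).contains "Late-systolic")
      ((["Early-systolic", "Mid-systolic"] : List String).contains "Late-systolic") l]
  apply List.flatMap_congr
  intro s _
  by_cases hs : s = 1
  · subst hs; simp
  · simp [hs]

theorem alt_at_holo (l : List Int) :
    add_murmur_seg_alt l "Holosystolic" = l.flatMap (fun s => if s = 1 then [4] else [s]) := by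
  unfold add_murmur_seg_alt
  rw [if_pos (by decide)]
  rw [alt_branch ((["Mid-systolic", "Late-systolic"] : List String).contains "Holosystolic")
      ((["Early-systolic", "Mid-systolic"] : List String).contains "Holosystolic") l]
  apply List.flatMap_congr
  intro s _
  by_cases hs : s = 1
  · subst hs; simp
  · simp [hs]

-- ===== VERDICT (by name: the statement is the Claim_ definition above) =====
theorem add_murmur_seg_spec : Claim_equal_add_murmur_seg := by
  intro l t _
  unfold Spec_add_murmur_seg
  by_cases h1 : t = "Early-systolic"
  · subst h1
    rw [alt_at_early, add_murmur_seg, if_pos (by decide),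
      branch_eq_acc l [4, 1] (fun s => [4, s]) rfl [], List.nil_append]
  · by_cases h2 : t = "Mid-systolic"
    · subst h2
      rw [alt_at_mid, add_murmur_seg, if_neg (by decide), if_pos (by decide),
        branch_eq_acc l [1, 4, 1] (fun s => [s, 4, s]) rfl [], List.nil_append]
    · by_cases h3 : t = "Late-systolic"
      · subst h3
        rw [alt_at_late, add_murmur_seg, if_neg (by decide), if_neg (by decide), if_pos (by decide),
          branch_eq_acc l [1, 4] (fun s => [s, 4]) rfl [], List.nil_append]
      · by_cases h4 : t = "Holosystolic"
        · subst h4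
          rw [alt_at_holo, add_murmur_seg, if_neg (by decide), if_neg (by decide),
            if_neg (by decide), if_pos (by decide),
            branch_eq_acc l [4] (fun _ => [4]) rfl [], List.nil_append]
        · unfold add_murmur_seg add_murmur_seg_alt
          simp [h1, h2, h3, h4]
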